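-- pv_equiv track=rewrite | github.com/bustos85/practicas_master_BigData-DataScience | lenguajes/Python/estads.py | obtener_columnas
-- ===== SOURCE A (Python) =====
-- from itertools import chain
-- from collections import defaultdict
--
-- def obtener_columnas(f):
--     """ Función que obtiene una lista con los elementos de cada columna
--     del fichero. Recorremos cada linea del fichero y las vamos almacenando en
--     una lista. Luego se crea un diccionario por cada linea, donde la clave será
--     la posición del elemento en la lista y el value el valor del elemento. Una
--     vez tenemos los diccionarios por linea los almacenamos en una lista de
--     diccionarios. Por último, agrupamos en un sólo diccionario todos los
--     diccionarios obtenidos anteriormente, agrupando por la key que sería el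
--     número de la columna en el fichero y los values la lista de sus valores."""
--     lista = []
--     listaDic = []
--     dicFinal = defaultdict(list)
--
--     for line in f:
--         line = line.strip().split(",")
--         if len(line) > 1:
--             lista.append(line)
--
--     for item in lista:
--         dic = {}
--         for i in range(len(item)):
--             dic[i] = item[i]
--         listaDic.append(dic)
--
--     for item in listaDic:
--         for k, v in chain(item.items()):
--             dicFinal[k].append(v)
--
--     return dicFinal
-- ===== SOURCE B (Python) =====
-- from collections import defaultdict
--
-- def obtener_columnas(f):
--     dicFinal = defaultdict(list)
--     for line in f:
--         parts = line.strip().split(",")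
--         if len(parts) > 1:
--             for i, v in enumerate(parts):
--                 dicFinal[i].append(v)
--     return dicFinal
-- ===== Notes on version B (the rewrite author's own statement) =====
-- stated objective: simpler
-- what changed: Replaces A's three sequential passes and two intermediate structures (list of split lines, list of per-line index dicts) with a single fused pass that appends each field to dicFinal[i] directly via enumerate.
import Mathlib
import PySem

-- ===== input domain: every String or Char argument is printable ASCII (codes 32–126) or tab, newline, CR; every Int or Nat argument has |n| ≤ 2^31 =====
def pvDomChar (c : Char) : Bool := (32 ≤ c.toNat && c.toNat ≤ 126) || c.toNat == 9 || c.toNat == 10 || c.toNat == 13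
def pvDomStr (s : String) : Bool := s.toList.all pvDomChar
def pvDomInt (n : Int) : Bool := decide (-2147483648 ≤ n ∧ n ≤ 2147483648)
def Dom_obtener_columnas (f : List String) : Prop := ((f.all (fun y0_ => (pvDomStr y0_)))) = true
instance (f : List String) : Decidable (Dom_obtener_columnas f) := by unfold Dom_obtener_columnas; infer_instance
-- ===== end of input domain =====

-- B fuses A's three passes (collect split lines, build per-line index dicts, merge)
-- into one pass appending each field to dicFinal[i] directly: simpler, same result.

-- line.strip().split(",")  (shared by both Pythons; sep "," is never empty, so split always returns)
def pvSplit (line : String) : List String :=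
  (PySem.Chars.splitOn (PySem.Chars.strip line.toList) ",".toList).map String.ofList

-- ===== PORT A =====
def obtener_columnas (f : List String) : List (Int × List String) :=
  let lista : List (List String) := f.foldl (fun acc line =>
      if (pvSplit line).length > 1 then acc ++ [pvSplit line] else acc) []
  let listaDic : List (PySem.Dict Int String) := lista.foldl (fun acc item =>
      acc ++ [(PySem.List.pyRange 0 (item.length : Int) 1).foldl
          (fun d i => d.insert i (PySem.List.pyGetD item i "")) PySem.Dict.empty]) []
  let dicFinal : PySem.Dict Int (List String) := listaDic.foldl (fun d item =>
      item.items.foldl (fun d kv => d.modify kv.1 [] (· ++ [kv.2])) d) PySem.Dict.empty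
  dicFinal.items

-- ===== PORT B =====
def obtener_columnas_alt (f : List String) : List (Int × List String) :=
  (f.foldl (fun d line =>
      if (pvSplit line).length > 1 then
        (PySem.List.enumerate (pvSplit line) 0).foldl
          (fun d p => d.modify p.1 [] (· ++ [p.2])) d
      else d) PySem.Dict.empty).items

-- ===== PRECONDITION & SPEC =====
def Spec_obtener_columnas (f : List String) (out : List (Int × List String)) : Prop := out = obtener_columnas_alt f
instance (f : List String) (out : List (Int × List String)) : Decidable (Spec_obtener_columnas f out) := by unfold Spec_obtener_columnas; infer_instance

-- ===== CLAIM (what is proved, stated in full; the proofs are below) =====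
def Claim_equal_obtener_columnas : Prop := ∀ (f : List String), Dom_obtener_columnas f → Spec_obtener_columnas f (obtener_columnas f)

-- ===== LEMMAS AND PROOFS =====

-- the dict {i: item[i] for i in range(len(item))} built by A's second loop
def pvDicOf (item : List String) : PySem.Dict Int String :=
  (PySem.List.pyRange 0 (item.length : Int) 1).foldl
    (fun d i => d.insert i (PySem.List.pyGetD item i "")) PySem.Dict.empty

-- the common normal form both ports reduce to
def pvCommon (f : List String) : List (Int × List String) :=
  (((f.map pvSplit).filter (fun b => b.length > 1)).foldl (fun d item =>
      (PySem.List.enumerate item 0).foldl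
        (fun d p => d.modify p.1 [] (· ++ [p.2])) d) PySem.Dict.empty).items

lemma pv_fold1 (l : List String) (acc : List (List String)) :
    l.foldl (fun acc line =>
        if (pvSplit line).length > 1 then acc ++ [pvSplit line] else acc) acc
      = acc ++ (l.map pvSplit).filter (fun b => b.length > 1) := by
  induction l generalizing acc with
  | nil => simp
  | cons x xs ih =>
      simp only [List.foldl, List.map, List.filter]
      by_cases h : (pvSplit x).length > 1 <;> simp [h, ih]

lemma pv_fold2 (l : List (List String)) (acc : List (PySem.Dict Int String)) :
    l.foldl (fun acc item =>
        acc ++ [(PySem.List.pyRange 0 (item.length : Int) 1).foldl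
            (fun d i => d.insert i (PySem.List.pyGetD item i "")) PySem.Dict.empty]) acc
      = acc ++ l.map pvDicOf := by
  induction l generalizing acc with
  | nil => simp
  | cons x xs ih => simp [List.foldl, ih, pvDicOf]

lemma pv_dicOf_items (item : List String) :
    (pvDicOf item).items = PySem.List.enumerate item 0 := by
  unfold pvDicOf
  rw [PySem.Dict.items_foldl_insert_fresh
        (k := fun i => i) (v := fun i => PySem.List.pyGetD item i "")]
  · rw [PySem.List.enumerate_eq_map_pyRange item ""]
    rfl
  · intro a _; simp
  · rw [PySem.List.pyRange_zero_natCast]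
    simp only [List.map_map]
    exact (List.nodup_range).map (fun a b h => by simpa using h)

lemma pv_fold3 (l : List String)
    (d : PySem.Dict Int (List String)) :
    l.foldl (fun d line =>
        if (pvSplit line).length > 1 then
          (PySem.List.enumerate (pvSplit line) 0).foldl
            (fun d p => d.modify p.1 [] (· ++ [p.2])) d
        else d) d
      = ((l.map pvSplit).filter (fun b => b.length > 1)).foldl (fun d item =>
          (PySem.List.enumerate item 0).foldl
            (fun d p => d.modify p.1 [] (· ++ [p.2])) d) d := by
  induction l generalizing d with
  | nil => rfl
  | cons x xs ih =>
      simp only [List.foldl, List.map, List.filter]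
      by_cases h : (pvSplit x).length > 1 <;> simp [h, ih]

lemma pvA_eq (f : List String) : obtener_columnas f = pvCommon f := by
  simp only [obtener_columnas, pvCommon, pv_fold1, pv_fold2, List.nil_append,
    List.foldl_map, pv_dicOf_items]

lemma pvB_eq (f : List String) : obtener_columnas_alt f = pvCommon f := by
  simp only [obtener_columnas_alt, pvCommon, pv_fold3]

-- ===== VERDICT (by name: the statement is the Claim_ definition above) =====
theorem obtener_columnas_spec : Claim_equal_obtener_columnas := by
  intro f _
  unfold Spec_obtener_columnas
  rw [pvA_eq, pvB_eq]
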